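-- pv_equiv track=rewrite | github.com/mobile-desk/PuzzleSprint | jan28/jan28.py | generate_leap_years
-- ===== SOURCE A (Python) =====
-- def generate_leap_years(start_year, count):
--     leap_years = []
--     current_year = start_year
--
--     while len(leap_years) < count:
--         if (current_year % 4 == 0 and current_year % 100 != 0) or (current_year % 400 == 0):
--             leap_years.append(current_year)
--         current_year += 1
--
--     return leap_years
-- ===== SOURCE B (Python) =====
-- def next_leap(y):
--     # smallest leap year >= y: align up to a multiple of 4, bump past a bad century
--     y += (-y) % 4
--     if y % 100 == 0 and y % 400 != 0:
--         y += 4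
--     return y
--
-- def generate_leap_years(start_year, count):
--     out = []
--     y = start_year
--     for _ in range(count):
--         y = next_leap(y)
--         out.append(y)
--         y += 4
--     return out
-- ===== Notes on version B (the rewrite author's own statement) =====
-- stated objective: faster
-- what changed: B iterates exactly count times, each time jumping directly to the next leap year with a closed-form helper (align to multiple of 4, bump past a bad century), instead of A's year-by-year scan testing every year.
import Mathlib
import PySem

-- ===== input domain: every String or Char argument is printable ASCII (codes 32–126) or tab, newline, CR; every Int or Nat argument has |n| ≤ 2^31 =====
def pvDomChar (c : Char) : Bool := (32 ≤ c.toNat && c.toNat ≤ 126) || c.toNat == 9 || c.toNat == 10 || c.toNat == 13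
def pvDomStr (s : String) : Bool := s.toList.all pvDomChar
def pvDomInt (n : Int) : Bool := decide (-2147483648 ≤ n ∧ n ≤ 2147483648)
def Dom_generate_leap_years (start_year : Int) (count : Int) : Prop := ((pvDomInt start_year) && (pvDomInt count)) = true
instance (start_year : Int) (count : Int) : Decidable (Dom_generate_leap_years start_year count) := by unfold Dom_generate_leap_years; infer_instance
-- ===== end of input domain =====

-- B jumps straight to each next leap year with a closed-form helper and iterates exactly count times, instead of A's year-by-year scan; return values proved equal.


-- ===== PORT A =====

-- the leap-year test of A's loop body, with Python ``%``
def pvIsLeap (y : Int) : Bool :=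
  (PySem.Int.mod y 4 == 0 && PySem.Int.mod y 100 != 0) || PySem.Int.mod y 400 == 0

theorem pvIsLeap_iff (y : Int) :
    pvIsLeap y = true ↔ ((y % 4 = 0 ∧ y % 100 ≠ 0) ∨ y % 400 = 0) := by
  simp [pvIsLeap, PySem.Int.mod_eq_emod_of_pos (a := y) (b := 4) (by norm_num),
    PySem.Int.mod_eq_emod_of_pos (a := y) (b := 100) (by norm_num),
    PySem.Int.mod_eq_emod_of_pos (a := y) (b := 400) (by norm_num)]

-- within any 8 consecutive years there is a leap year (needed for termination of A's while loop)
theorem pv_exists_leap_le7 (y : Int) : ∃ d : Nat, d ≤ 7 ∧ pvIsLeap (y + d) = true := by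
  by_cases hg : (y + (-y) % 4) % 100 ≠ 0 ∨ (y + (-y) % 4) % 400 = 0
  · refine ⟨((-y) % 4).toNat, by omega, ?_⟩
    rw [pvIsLeap_iff]
    have : ((((-y) % 4).toNat : Int)) = (-y) % 4 := by omega
    rw [this]
    rcases hg with h | h
    · exact Or.inl ⟨by omega, h⟩
    · exact Or.inr h
  · push_neg at hg
    refine ⟨((-y) % 4 + 4).toNat, by omega, ?_⟩
    rw [pvIsLeap_iff]
    have : ((((-y) % 4 + 4).toNat : Int)) = (-y) % 4 + 4 := by omega
    rw [this]
    exact Or.inl ⟨by omega, by omega⟩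

theorem pv_exists_leap (y : Int) : ∃ d : Nat, pvIsLeap (y + d) = true := by
  obtain ⟨d, _, hd⟩ := pv_exists_leap_le7 y; exact ⟨d, hd⟩

-- distance to the next leap year
def pvGap (y : Int) : Nat := Nat.find (pv_exists_leap y)

theorem pvGap_le7 (y : Int) : pvGap y ≤ 7 := by
  obtain ⟨d, hd7, hd⟩ := pv_exists_leap_le7 y
  exact le_trans (Nat.find_le hd) hd7

theorem pvGap_succ_lt (y : Int) (h : ¬ pvIsLeap y = true) : pvGap (y + 1) < pvGap y := by
  have hs : pvIsLeap (y + (pvGap y : Int)) = true := Nat.find_spec (pv_exists_leap y)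
  have h0 : pvGap y ≠ 0 := by
    intro h0; rw [h0] at hs; simp at hs; exact h hs
  have hle : pvGap (y + 1) ≤ pvGap y - 1 := by
    apply Nat.find_le
    have : (y + 1 + ((pvGap y - 1 : Nat) : Int)) = y + (pvGap y : Int) := by omega
    rw [this]; exact hs
  omega

-- A's while loop, literally: scan year by year, append each leap year until count are collected
def pvLoopA (count : Int) (acc : List Int) (cur : Int) : List Int :=
  if h : (acc.length : Int) < count then
    if hl : pvIsLeap cur = true then
      pvLoopA count (acc ++ [cur]) (cur + 1)
    else
      pvLoopA count acc (cur + 1)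
  else acc
termination_by (count.toNat - acc.length) * 8 + pvGap cur
decreasing_by
  · have h7 := pvGap_le7 (cur + 1)
    simp only [List.length_append, List.length_cons, List.length_nil]
    omega
  · have := pvGap_succ_lt cur hl
    omega

def generate_leap_years (start_year : Int) (count : Int) : List Int :=
  pvLoopA count [] start_year

-- ===== PORT B =====

-- Source B's next_leap: smallest leap year >= y, closed form (align to multiple of 4, bump past a bad century)
def pvNext (y : Int) : Int :=
  let m := y + PySem.Int.mod (-y) 4
  if PySem.Int.mod m 100 == 0 && PySem.Int.mod m 400 != 0 then m + 4 else m

-- Source B's for-loop over range(count): structural recursion on the trip count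
def pvLoopB : Nat → Int → List Int → List Int
  | 0, _, out => out
  | Nat.succ n, y, out => pvLoopB n (pvNext y + 4) (out ++ [pvNext y])

def generate_leap_years_alt (start_year : Int) (count : Int) : List Int :=
  pvLoopB count.toNat start_year []

-- ===== PRECONDITION & SPEC =====
def Spec_generate_leap_years (start_year : Int) (count : Int) (out : List Int) : Prop := out = generate_leap_years_alt start_year count
instance (start_year : Int) (count : Int) (out : List Int) : Decidable (Spec_generate_leap_years start_year count out) := by unfold Spec_generate_leap_years; infer_instance

-- ===== CLAIM (what is proved, stated in full; the proofs are below) =====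
def Claim_equal_generate_leap_years : Prop := ∀ (start_year : Int) (count : Int), Dom_generate_leap_years start_year count → Spec_generate_leap_years start_year count (generate_leap_years start_year count)

-- ===== LEMMAS AND PROOFS =====

theorem pvIsLeap_eq_false_iff (y : Int) :
    pvIsLeap y = false ↔ ¬ ((y % 4 = 0 ∧ y % 100 ≠ 0) ∨ y % 400 = 0) := by
  have h := pvIsLeap_iff y
  cases hb : pvIsLeap y <;> simp_all

-- characterisation of pvNext: it is a leap year, at most y+7, and nothing in [y, pvNext y) is leap
theorem pvNext_spec (y : Int) :
    y ≤ pvNext y ∧ (pvNext y) % 4 = 0 ∧ pvIsLeap (pvNext y) = true ∧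
      ∀ j : Nat, (y + (j : Int)) < pvNext y → pvIsLeap (y + (j : Int)) = false := by
  simp only [pvNext]
  rw [PySem.Int.mod_eq_emod_of_pos (a := -y) (b := 4) (by norm_num)]
  set m := y + (-y) % 4 with hm
  rw [PySem.Int.mod_eq_emod_of_pos (a := m) (b := 100) (by norm_num),
    PySem.Int.mod_eq_emod_of_pos (a := m) (b := 400) (by norm_num)]
  by_cases hc : m % 100 = 0 ∧ m % 400 ≠ 0
  · have hif : (m % 100 == 0 && m % 400 != 0) = true := by
      simp [hc.1, hc.2]
    rw [hif]
    simp only [if_true]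
    refine ⟨by omega, by omega, ?_, ?_⟩
    · rw [pvIsLeap_iff]; omega
    · intro j hj
      rw [pvIsLeap_eq_false_iff]; omega
  · have hif : (m % 100 == 0 && m % 400 != 0) = false := by
      rcases not_and_or.mp hc with h | h
      · simp [h]
      · push_neg at h; simp [h]
    rw [hif]
    simp only [Bool.false_eq_true, if_false]
    have hgood : m % 100 ≠ 0 ∨ m % 400 = 0 := by
      rcases not_and_or.mp hc with h | h
      · exact Or.inl h
      · push_neg at h; exact Or.inr h
    refine ⟨by omega, by omega, ?_, ?_⟩
    · rw [pvIsLeap_iff]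
      rcases hgood with h | h
      · exact Or.inl ⟨by omega, h⟩
      · exact Or.inr h
    · intro j hj
      rw [pvIsLeap_eq_false_iff]; omega

-- A's loop skips over non-leap years unchanged
theorem pvLoopA_skip (count : Int) :
    ∀ (k : Nat) (acc : List Int) (cur : Int),
      (∀ j : Nat, j < k → pvIsLeap (cur + j) = false) →
      pvLoopA count acc cur = pvLoopA count acc (cur + k) := by
  intro k
  induction k with
  | zero => intro acc cur _; simp
  | succ k ih =>
    intro acc cur h
    have h0 : pvIsLeap cur = false := by simpa using h 0 (by omega)
    have hl : ¬ pvIsLeap cur = true := by simp [h0]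
    have hstep : pvLoopA count acc cur = pvLoopA count acc (cur + 1) := by
      rw [pvLoopA]
      by_cases hc : (acc.length : Int) < count
      · simp [hc, hl]
      · conv_rhs => rw [pvLoopA]
        simp [hc]
    rw [hstep, ih acc (cur + 1) (fun j hj => by
      have := h (j + 1) (by omega)
      have e : cur + 1 + (j : Int) = cur + ((j : Nat) + 1 : Nat) := by push_cast; ring
      rw [e]; exact this)]
    congr 1
    push_cast; ring

-- one productive step of A's loop: it scans up to pvNext cur, appends it, and moves past it
theorem pvLoopA_step (count : Int) (acc : List Int) (cur : Int)
    (hc : (acc.length : Int) < count) :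
    pvLoopA count acc cur = pvLoopA count (acc ++ [pvNext cur]) (pvNext cur + 4) := by
  obtain ⟨hge, h4, hleap, hmin⟩ := pvNext_spec cur
  have h1 : pvLoopA count acc cur = pvLoopA count acc (pvNext cur) := by
    rw [pvLoopA_skip count (pvNext cur - cur).toNat acc cur (fun j hj => hmin j (by omega))]
    congr 1; omega
  have h2 : pvLoopA count acc (pvNext cur) =
      pvLoopA count (acc ++ [pvNext cur]) (pvNext cur + 1) := by
    rw [pvLoopA]; simp [hc, hleap]
  have h3 : pvLoopA count (acc ++ [pvNext cur]) (pvNext cur + 1) =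
      pvLoopA count (acc ++ [pvNext cur]) (pvNext cur + 4) := by
    rw [pvLoopA_skip count 3 (acc ++ [pvNext cur]) (pvNext cur + 1) (fun j hj => by
      rw [pvIsLeap_eq_false_iff]
      interval_cases j <;> omega)]
    congr 1; push_cast; ring
  rw [h1, h2, h3]

-- main equivalence: A's scan equals B's count-fold, for any remaining trip count
theorem pvLoopA_eq_pvLoopB (count : Int) :
    ∀ (n : Nat) (acc : List Int) (cur : Int),
      count.toNat - acc.length = n →
      pvLoopA count acc cur = pvLoopB n cur acc := by
  intro n
  induction n with
  | zero =>
    intro acc cur hn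
    have hc : ¬ (acc.length : Int) < count := by omega
    rw [pvLoopA, pvLoopB]; simp [hc]
  | succ n ih =>
    intro acc cur hn
    have hc : (acc.length : Int) < count := by omega
    rw [pvLoopA_step count acc cur hc, pvLoopB]
    exact ih (acc ++ [pvNext cur]) (pvNext cur + 4) (by simp; omega)

-- ===== VERDICT (by name: the statement is the Claim_ definition above) =====
theorem generate_leap_years_spec : Claim_equal_generate_leap_years := by
  intro s c _
  unfold Spec_generate_leap_years generate_leap_years generate_leap_years_alt
  exact pvLoopA_eq_pvLoopB c c.toNat [] s (by simp)
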